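-- pv_equiv track=rewrite | github.com/sewon-p/sumo-traffic-agent | training/build_from_real_data.py | get_time_label
-- ===== SOURCE A (Python) =====
-- TIME_LABELS = {
--     (7, 9): "출근시간",
--     (9, 12): "오전",
--     (12, 14): "점심시간",
--     (14, 17): "오후",
--     (17, 20): "퇴근시간",
--     (20, 23): "야간",
--     (23, 7): "심야",
-- }
--
-- def get_time_label(hour: int) -> str:
--     """Return the time-of-day label for the given hour."""
--     for (h1, h2), label in TIME_LABELS.items():
--         if h1 <= h2:
--             if h1 <= hour < h2:
--                 return label
--         else:  # Late night (23~7)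
--             if hour >= h1 or hour < h2:
--                 return label
--     return "기타"
-- ===== SOURCE B (Python) =====
-- _RANGES = [
--     (7, 9, "출근시간"),
--     (9, 12, "오전"),
--     (12, 14, "점심시간"),
--     (14, 17, "오후"),
--     (17, 20, "퇴근시간"),
--     (20, 23, "야간"),
--     (23, 24, "심야"),
--     (0, 7, "심야"),
-- ]
--
-- HOUR_TO_LABEL = [None] * 24
-- for _a, _b, _lab in _RANGES:
--     for _h in range(_a, _b):
--         HOUR_TO_LABEL[_h] = _lab
--
-- def get_time_label(hour: int) -> str:
--     """Return the time-of-day label for the given hour."""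
--     return HOUR_TO_LABEL[min(max(hour, 0), 23)]
-- ===== Notes on version B (the rewrite author's own statement) =====
-- stated objective: simpler
-- what changed: Replaced the loop over range pairs with range-comparison branches by a lookup table (one entry per hour of the day) built once; get_time_label is a single clamped index into it, and clamping sends out-of-range hours to the same wraparound label A's comparisons do.
import Mathlib
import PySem

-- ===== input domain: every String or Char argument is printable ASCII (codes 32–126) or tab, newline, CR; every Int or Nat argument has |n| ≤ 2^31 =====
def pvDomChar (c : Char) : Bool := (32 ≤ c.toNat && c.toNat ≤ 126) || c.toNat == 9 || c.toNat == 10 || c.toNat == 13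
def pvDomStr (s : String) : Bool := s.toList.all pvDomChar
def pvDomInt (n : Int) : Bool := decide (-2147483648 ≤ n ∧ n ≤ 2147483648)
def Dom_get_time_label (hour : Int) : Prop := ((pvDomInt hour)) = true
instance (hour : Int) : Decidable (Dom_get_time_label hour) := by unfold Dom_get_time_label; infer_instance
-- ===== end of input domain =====

-- B replaces A's loop over (h1,h2)-range comparisons by a precomputed 24-entry lookup table read with a clamped index; objective: simpler.


-- ===== PORT A =====
def TIME_LABELS : List ((Int × Int) × String) :=
  [((7, 9), "출근시간"), ((9, 12), "오전"), ((12, 14), "점심시간"),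
   ((14, 17), "오후"), ((17, 20), "퇴근시간"), ((20, 23), "야간"), ((23, 7), "심야")]

-- A's for-loop with early return, as structural recursion over the dict items
def getTimeLabelLoop (hour : Int) : List ((Int × Int) × String) → String
  | [] => "기타"
  | ((h1, h2), label) :: rest =>
      if h1 ≤ h2 then
        if h1 ≤ hour ∧ hour < h2 then label else getTimeLabelLoop hour rest
      else
        if hour ≥ h1 ∨ hour < h2 then label else getTimeLabelLoop hour rest

def get_time_label (hour : Int) : String := getTimeLabelLoop hour TIME_LABELS

-- ===== PORT B =====
def RANGES : List (Int × Int × String) :=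
  [(7, 9, "출근시간"), (9, 12, "오전"), (12, 14, "점심시간"), (14, 17, "오후"),
   (17, 20, "퇴근시간"), (20, 23, "야간"), (23, 24, "심야"), (0, 7, "심야")]

-- B's table-building loop: start from 24 placeholders, write each range's label into its hours
def HOUR_TO_LABEL : List String :=
  RANGES.foldl
    (fun tbl r =>
      (PySem.List.pyRange r.1 r.2.1 1).foldl (fun t h => t.set h.toNat r.2.2) tbl)
    (List.replicate 24 "")

def get_time_label_alt (hour : Int) : String :=
  (PySem.List.pyGet? HOUR_TO_LABEL (min (max hour 0) 23)).getD ""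

-- ===== PRECONDITION & SPEC =====
def Spec_get_time_label (hour : Int) (out : String) : Prop := out = get_time_label_alt hour
instance (hour : Int) (out : String) : Decidable (Spec_get_time_label hour out) := by unfold Spec_get_time_label; infer_instance

-- ===== CLAIM (what is proved, stated in full; the proofs are below) =====
def Claim_equal_get_time_label : Prop := ∀ (hour : Int), Dom_get_time_label hour → Spec_get_time_label hour (get_time_label hour)

-- ===== LEMMAS AND PROOFS =====

-- one loop step that does not match (upward range)
lemma loop_skip (hour h1 h2 : Int) (lab : String) (rest : List ((Int × Int) × String))
    (hle : h1 ≤ h2) (hno : ¬(h1 ≤ hour ∧ hour < h2)) :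
    getTimeLabelLoop hour (((h1, h2), lab) :: rest) = getTimeLabelLoop hour rest := by
  rw [getTimeLabelLoop, if_pos hle, if_neg hno]

-- the wraparound item matching
lemma loop_wrap_hit (hour h1 h2 : Int) (lab : String) (rest : List ((Int × Int) × String))
    (hgt : ¬ h1 ≤ h2) (hyes : hour ≥ h1 ∨ hour < h2) :
    getTimeLabelLoop hour (((h1, h2), lab) :: rest) = lab := by
  rw [getTimeLabelLoop, if_neg hgt, if_pos hyes]

-- out-of-range hours: A falls to the wraparound item, B clamps to index 0 or 23
lemma gtl_out (hour : Int) (h : hour < 0 ∨ 23 ≤ hour) :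
    get_time_label hour = "심야" ∧ get_time_label_alt hour = "심야" := by
  constructor
  · rw [get_time_label, TIME_LABELS,
        loop_skip _ _ _ _ _ (by norm_num) (by omega),
        loop_skip _ _ _ _ _ (by norm_num) (by omega),
        loop_skip _ _ _ _ _ (by norm_num) (by omega),
        loop_skip _ _ _ _ _ (by norm_num) (by omega),
        loop_skip _ _ _ _ _ (by norm_num) (by omega),
        loop_skip _ _ _ _ _ (by norm_num) (by omega),
        loop_wrap_hit _ _ _ _ _ (by norm_num) (by omega)]
  · rcases h with h | h
    · have e : min (max hour 0) 23 = 0 := by omega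
      rw [get_time_label_alt, e]; decide
    · have e : min (max hour 0) 23 = 23 := by omega
      rw [get_time_label_alt, e]; decide

-- ===== VERDICT (by name: the statement is the Claim_ definition above) =====
theorem get_time_label_spec : Claim_equal_get_time_label := by
  intro hour _
  unfold Spec_get_time_label
  rcases lt_or_ge hour 0 with h | h
  · rw [(gtl_out hour (Or.inl h)).1, (gtl_out hour (Or.inl h)).2]
  · rcases lt_or_ge hour 23 with h2 | h2
    · interval_cases hour <;> decide
    · rw [(gtl_out hour (Or.inr h2)).1, (gtl_out hour (Or.inr h2)).2]
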